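-- pv_equiv track=rewrite | github.com/zoefei/Data_mining | apriori_algo/c.py | Apriori_count_subset
-- ===== SOURCE A (Python) =====
-- def Apriori_count_subset(fin,trans):
-- 	tmp = {}
-- 	for f in fin:
-- 		for tran in trans:
-- 			if set(tran) >= set(f):
-- 				key = str(f)
-- 				if key in tmp:
-- 					tmp[key] += 1
-- 				else:
-- 					tmp[key] = 1
-- 	return tmp
-- ===== SOURCE B (Python) =====
-- def Apriori_count_subset(fin, trans):
--     # Inverted index: item -> set of indices of transactions containing it.
--     index = {}
--     for i, tran in enumerate(trans):
--         for item in set(tran):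
--             index.setdefault(item, set()).add(i)
--     tmp = {}
--     for f in fin:
--         posting = set(range(len(trans)))
--         for item in set(f):
--             posting &= index.get(item, set())
--         count = len(posting)
--         if count > 0:
--             key = str(f)
--             tmp[key] = tmp.get(key, 0) + count
--     return tmp
-- ===== Notes on version B (the rewrite author's own statement) =====
-- stated objective: faster
-- what changed: B builds an inverted index (item -> set of transaction indices) in one pass over trans and counts each itemset by intersecting posting sets, instead of A's full scan of all transactions per itemset with per-match dict increments.
import Mathlib
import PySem

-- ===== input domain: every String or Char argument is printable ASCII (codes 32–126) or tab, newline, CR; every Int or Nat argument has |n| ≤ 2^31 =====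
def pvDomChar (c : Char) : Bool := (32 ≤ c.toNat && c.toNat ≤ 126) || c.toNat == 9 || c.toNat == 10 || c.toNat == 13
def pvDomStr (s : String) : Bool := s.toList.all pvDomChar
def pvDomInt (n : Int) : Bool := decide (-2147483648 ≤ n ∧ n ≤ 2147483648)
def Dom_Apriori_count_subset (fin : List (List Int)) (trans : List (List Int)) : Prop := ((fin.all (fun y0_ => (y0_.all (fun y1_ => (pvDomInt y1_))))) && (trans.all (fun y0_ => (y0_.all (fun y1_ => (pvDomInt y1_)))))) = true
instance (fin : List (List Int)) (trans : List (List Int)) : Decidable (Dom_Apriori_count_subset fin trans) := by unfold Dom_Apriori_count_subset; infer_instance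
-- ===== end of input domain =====

-- B replaces A's quadratic scan (every itemset against every transaction) by an inverted index
-- from item to the set of indices of transactions containing it, intersecting posting sets per itemset.


-- str(f) for a Python list of ints: "[a, b, c]" (shared by both ports: both Pythons compute str(f))
def pyStrIntList (f : List Int) : String :=
  "[" ++ PySem.Str.join ", " (f.map PySem.Int.toStr) ++ "]"

-- ===== PORT A =====
def Apriori_count_subset (fin : List (List Int)) (trans : List (List Int)) : List (String × Int) :=
  (fin.foldl (fun tmp f =>
      trans.foldl (fun tmp tran =>
        if PySem.Set.issuperset (PySem.Set.ofList tran) (PySem.Set.ofList f) then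
          let key := pyStrIntList f
          if tmp.contains key then tmp.insert key (tmp.getD key 0 + 1)
          else tmp.insert key 1
        else tmp) tmp)
    (PySem.Dict.empty : PySem.Dict String Int)).items

-- ===== PORT B =====
-- inverted index: item -> set of indices of transactions containing it
def pvIndex (trans : List (List Int)) : PySem.Dict Int (PySem.Set Int) :=
  (PySem.List.enumerate trans).foldl (fun ix p =>
      (PySem.Set.ofList p.2).foldl (fun ix item =>
        ix.modify item PySem.Set.empty (fun s => PySem.Set.add s p.1)) ix)
    PySem.Dict.empty

def Apriori_count_subset_alt (fin : List (List Int)) (trans : List (List Int)) : List (String × Int) :=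
  let index := pvIndex trans
  (fin.foldl (fun tmp f =>
      let posting := (PySem.Set.ofList f).foldl
          (fun p item => PySem.Set.inter p (index.getD item PySem.Set.empty))
          (PySem.Set.ofList (PySem.List.pyRange 0 (trans.length : Int) 1))
      let count : Int := PySem.Set.len posting
      if count > 0 then
        let key := pyStrIntList f
        tmp.insert key (tmp.getD key 0 + count)
      else tmp)
    (PySem.Dict.empty : PySem.Dict String Int)).items

-- ===== PRECONDITION & SPEC =====
def Spec_Apriori_count_subset (fin : List (List Int)) (trans : List (List Int)) (out : List (String × Int)) : Prop := out = Apriori_count_subset_alt fin trans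
instance (fin : List (List Int)) (trans : List (List Int)) (out : List (String × Int)) : Decidable (Spec_Apriori_count_subset fin trans out) := by unfold Spec_Apriori_count_subset; infer_instance

-- ===== CLAIM (what is proved, stated in full; the proofs are below) =====
def Claim_equal_Apriori_count_subset : Prop := ∀ (fin : List (List Int)) (trans : List (List Int)), Dom_Apriori_count_subset fin trans → Spec_Apriori_count_subset fin trans (Apriori_count_subset fin trans)

-- ===== LEMMAS AND PROOFS =====

lemma upsert_uniform (tmp : PySem.Dict String Int) (key : String) :
    (if tmp.contains key then tmp.insert key (tmp.getD key 0 + 1) else tmp.insert key 1)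
      = tmp.insert key (tmp.getD key 0 + 1) := by
  by_cases h : tmp.contains key
  · simp [h]
  · simp only [Bool.not_eq_true] at h
    simp [h, PySem.Dict.getD, (PySem.Dict.get?_eq_none_iff_contains tmp key).2 h]

lemma foldl_upsert (key : String) (pred : List Int → Bool) (ts : List (List Int))
    (tmp : PySem.Dict String Int) :
    ts.foldl (fun tmp tran =>
        if pred tran then
          (if tmp.contains key then tmp.insert key (tmp.getD key 0 + 1) else tmp.insert key 1)
        else tmp) tmp
      = if ts.countP pred = 0 then tmp
        else tmp.insert key (tmp.getD key 0 + (ts.countP pred : Int)) := by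
  induction ts generalizing tmp with
  | nil => simp
  | cons t ts ih =>
    simp only [List.foldl_cons, List.countP_cons]
    by_cases hp : pred t
    · rw [if_pos hp, upsert_uniform, ih]
      simp only [hp, if_true]
      by_cases hc : ts.countP pred = 0
      · simp [hc]
      · rw [if_neg hc, if_neg (by omega), PySem.Dict.insert_insert_self,
          PySem.Dict.getD_insert_self]
        congr 1
        push_cast
        ring
    · simp only [hp, if_false, Bool.false_eq_true, ih]
      norm_num

lemma mem_inner (l : List Int) (j : Int) (ix : PySem.Dict Int (PySem.Set Int))
    (item : Int) (i : Int) :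
    i ∈ (l.foldl (fun ix it => ix.modify it PySem.Set.empty (fun s => PySem.Set.add s j)) ix).getD item PySem.Set.empty
      ↔ i ∈ ix.getD item PySem.Set.empty ∨ (item ∈ l ∧ i = j) := by
  induction l generalizing ix with
  | nil => simp
  | cons x xs ih =>
    simp only [List.foldl_cons, ih, List.mem_cons]
    rw [PySem.Dict.getD_modify]
    by_cases hx : item = x
    · simp [hx, PySem.Set.mem_add]
      tauto
    · simp [hx]

lemma mem_index_aux (ts : List (List Int)) (s : Int) (d : PySem.Dict Int (PySem.Set Int))
    (item : Int) (i : Int) :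
    i ∈ ((PySem.List.enumerate ts s).foldl (fun ix p =>
        (PySem.Set.ofList p.2).foldl (fun ix it =>
          ix.modify it PySem.Set.empty (fun s' => PySem.Set.add s' p.1)) ix) d).getD item PySem.Set.empty
      ↔ i ∈ d.getD item PySem.Set.empty
        ∨ ∃ k : Nat, k < ts.length ∧ i = s + (k : Int) ∧ item ∈ ts.getD k [] := by
  induction ts generalizing s d with
  | nil => simp [PySem.List.enumerate_nil]
  | cons t ts ih =>
    rw [PySem.List.enumerate_cons]
    simp only [List.foldl_cons, ih, mem_inner, PySem.Set.mem_ofList]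
    constructor
    · rintro (((h | ⟨hm, rfl⟩)) | ⟨k, hk, rfl, hmem⟩)
      · exact Or.inl h
      · exact Or.inr ⟨0, by simp, by ring, by simpa⟩
      · exact Or.inr ⟨k + 1, by simp; omega, by push_cast; ring, by simpa⟩
    · rintro (h | ⟨k, hk, rfl, hmem⟩)
      · exact Or.inl (Or.inl h)
      · cases k with
        | zero => exact Or.inl (Or.inr ⟨by simpa using hmem, by ring⟩)
        | succ k => exact Or.inr ⟨k, by simpa using hk, by push_cast; ring, by simpa using hmem⟩

lemma mem_index_getD (trans : List (List Int)) (item : Int) (i : Int) :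
    i ∈ (pvIndex trans).getD item PySem.Set.empty
      ↔ ∃ k : Nat, k < trans.length ∧ i = (k : Int) ∧ item ∈ trans.getD k [] := by
  rw [pvIndex]
  rw [mem_index_aux]
  simp [PySem.Dict.getD_empty, PySem.Set.empty]

lemma foldl_inter (l : List Int) (g : Int → PySem.Set Int) (p0 : PySem.Set Int) :
    l.foldl (fun p item => PySem.Set.inter p (g item)) p0
      = p0.filter (fun i => l.all (fun x => (g x).contains i)) := by
  induction l generalizing p0 with
  | nil => simp
  | cons x xs ih =>
    rw [List.foldl_cons, ih]
    simp only [PySem.Set.inter, List.filter_filter, List.all_cons]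
    exact List.filter_congr (fun a _ => by rw [Bool.and_comm])

lemma posting_len (f : List Int) (trans : List (List Int)) :
    ((PySem.Set.ofList f).foldl
        (fun p item => PySem.Set.inter p ((pvIndex trans).getD item PySem.Set.empty))
        (PySem.Set.ofList (PySem.List.pyRange 0 (trans.length : Int) 1))).length
      = trans.countP (fun tran => PySem.Set.issuperset (PySem.Set.ofList tran) (PySem.Set.ofList f)) := by
  rw [foldl_inter,
    PySem.Set.ofList_eq_self_of_nodup _ (PySem.List.nodup_pyRange_one 0 (trans.length : Int))]
  -- rewrite the filter predicate on members of the range into a predicate on trans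
  rw [List.filter_congr (q := fun i => decide (∀ x ∈ f, x ∈ trans.getD i.toNat []))
    (fun i hi => by
      rw [PySem.List.mem_pyRange_one] at hi
      rw [Bool.eq_iff_iff]
      simp only [List.all_eq_true, decide_eq_true_eq]
      constructor
      · intro h x hx
        have := (PySem.Set.contains_iff _ i).1 (h x (by simpa [PySem.Set.mem_ofList] using hx))
        rw [mem_index_getD] at this
        obtain ⟨k, hk, hik, hm⟩ := this
        simpa [hik] using hm
      · intro h x hx
        rw [PySem.Set.contains_iff, mem_index_getD]
        refine ⟨i.toNat, by omega, by omega, h x (by simpa [PySem.Set.mem_ofList] using hx)⟩)]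
  -- now count over the range equals countP over trans
  rw [PySem.List.pyRange_one, ← List.countP_eq_length_filter, List.countP_map]
  have hn : (((trans.length : Int)) - 0).toNat = trans.length := by omega
  rw [hn]
  have : ∀ P : List Int → Bool, ∀ ts : List (List Int),
      (List.range ts.length).countP (fun k => P (ts.getD k [])) = ts.countP P := by
    intro P ts
    induction ts with
    | nil => simp
    | cons t ts ih =>
      rw [List.length_cons, List.range_succ_eq_map, List.countP_cons, List.countP_map]
      simp only [List.getD_cons_zero, Function.comp_def, List.getD_cons_succ]
      rw [ih, List.countP_cons]
  rw [← this]
  refine List.countP_congr (fun k hk => ?_)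
  simp only [Function.comp_def, zero_add, Int.toNat_natCast]
  rw [Bool.eq_iff_iff]
  simp only [decide_eq_true_eq, PySem.Set.issuperset_iff, PySem.Set.mem_ofList]
  tauto

-- one step of the outer loop over fin: A's inner scan = B's posting-set intersection step
lemma step_eq (trans : List (List Int)) (tmp : PySem.Dict String Int) (f : List Int) :
    trans.foldl (fun tmp tran =>
        if PySem.Set.issuperset (PySem.Set.ofList tran) (PySem.Set.ofList f) then
          let key := pyStrIntList f
          if tmp.contains key then tmp.insert key (tmp.getD key 0 + 1)
          else tmp.insert key 1
        else tmp) tmp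
      = (let posting := (PySem.Set.ofList f).foldl
            (fun p item => PySem.Set.inter p ((pvIndex trans).getD item PySem.Set.empty))
            (PySem.Set.ofList (PySem.List.pyRange 0 (trans.length : Int) 1))
         let count : Int := PySem.Set.len posting
         if count > 0 then
           let key := pyStrIntList f
           tmp.insert key (tmp.getD key 0 + count)
         else tmp) := by
  show trans.foldl (fun tmp tran =>
        if (fun tran => PySem.Set.issuperset (PySem.Set.ofList tran) (PySem.Set.ofList f)) tran then
          (if tmp.contains (pyStrIntList f) then
            tmp.insert (pyStrIntList f) (tmp.getD (pyStrIntList f) 0 + 1)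
          else tmp.insert (pyStrIntList f) 1)
        else tmp) tmp = _
  rw [foldl_upsert]
  simp only [PySem.Set.len, posting_len]
  by_cases h : trans.countP (fun tran => PySem.Set.issuperset (PySem.Set.ofList tran) (PySem.Set.ofList f)) = 0
  · simp [h]
  · rw [if_neg h, if_pos (by exact_mod_cast Nat.pos_of_ne_zero h)]

-- the whole outer loop over fin, with the accumulator generalized
lemma fold_eq (trans : List (List Int)) (fin : List (List Int)) (tmp : PySem.Dict String Int) :
    fin.foldl (fun tmp f =>
        trans.foldl (fun tmp tran =>
          if PySem.Set.issuperset (PySem.Set.ofList tran) (PySem.Set.ofList f) then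
            let key := pyStrIntList f
            if tmp.contains key then tmp.insert key (tmp.getD key 0 + 1)
            else tmp.insert key 1
          else tmp) tmp) tmp
      = fin.foldl (fun tmp f =>
          let posting := (PySem.Set.ofList f).foldl
              (fun p item => PySem.Set.inter p ((pvIndex trans).getD item PySem.Set.empty))
              (PySem.Set.ofList (PySem.List.pyRange 0 (trans.length : Int) 1))
          let count : Int := PySem.Set.len posting
          if count > 0 then
            let key := pyStrIntList f
            tmp.insert key (tmp.getD key 0 + count)
          else tmp) tmp := by
  induction fin generalizing tmp with
  | nil => rfl
  | cons f fin ih =>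
    rw [List.foldl_cons, List.foldl_cons, step_eq]
    exact ih _

-- ===== VERDICT (by name: the statement is the Claim_ definition above) =====
theorem Apriori_count_subset_spec : Claim_equal_Apriori_count_subset := by
  intro fin trans _
  exact congrArg PySem.Dict.items (fold_eq trans fin PySem.Dict.empty)
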